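-- pv_equiv track=rewrite | github.com/obiyoag/plaque | utils.py | digitize_stenosis
-- ===== SOURCE A (Python) =====
-- def digitize_stenosis(stenosis):
--     """
--     按照frame的狭窄程度，返回一个狭窄程度list
--     0-20没有狭窄，20-50轻度，50-100重度
--     """
--     result = []
--     for frame_stenosis in stenosis:
--         if frame_stenosis < 20:
--             result.append(0)
--         elif 20<= frame_stenosis <50:
--             result.append(1)
--         elif frame_stenosis >= 50:
--             result.append(2)
--     return max(result)
-- ===== SOURCE B (Python) =====
-- def digitize_stenosis(stenosis):
--     m = max(stenosis)
--     if m < 20: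
--         return 0
--     if m < 50:
--         return 1
--     return 2
-- ===== Notes on version B (the rewrite author's own statement) =====
-- stated objective: simpler
-- what changed: B drops the per-frame category list entirely: it takes the max stenosis value in one reduction and categorizes that single value, exploiting that categorization is monotonic.
import Mathlib
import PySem

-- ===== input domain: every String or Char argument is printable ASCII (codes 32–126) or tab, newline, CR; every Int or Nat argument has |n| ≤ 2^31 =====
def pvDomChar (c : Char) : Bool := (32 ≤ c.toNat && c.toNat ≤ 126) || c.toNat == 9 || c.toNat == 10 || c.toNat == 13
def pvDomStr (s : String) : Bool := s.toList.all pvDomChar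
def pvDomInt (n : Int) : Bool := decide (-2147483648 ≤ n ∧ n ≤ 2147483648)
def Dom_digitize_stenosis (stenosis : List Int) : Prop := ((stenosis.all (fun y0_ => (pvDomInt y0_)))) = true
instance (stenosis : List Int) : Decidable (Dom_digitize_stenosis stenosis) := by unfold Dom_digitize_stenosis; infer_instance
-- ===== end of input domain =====

-- B replaces the per-frame category list with one max reduction followed by a single
-- threshold check (simpler decomposition; categorization is monotone in stenosis).


-- ===== PORT A =====
def digitize_stenosis (stenosis : List Int) : Int :=
  let result := stenosis.foldl (fun result frame_stenosis =>
    if frame_stenosis < 20 then result ++ [(0 : Int)]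
    else if 20 ≤ frame_stenosis ∧ frame_stenosis < 50 then result ++ [(1 : Int)]
    else if frame_stenosis ≥ 50 then result ++ [(2 : Int)]
    else result) []
  -- max(result): none = ValueError on the empty list, excluded by Pre_
  (PySem.List.max? result (fun y => y)).getD 0

-- ===== PORT B =====
def digitize_stenosis_alt (stenosis : List Int) : Int :=
  -- max(stenosis): none = ValueError on the empty list, excluded by Pre_
  match PySem.List.max? stenosis (fun y => y) with
  | none => 0
  | some m => if m < 20 then 0 else if m < 50 then 1 else 2

-- ===== PRECONDITION & SPEC =====
-- A (and B) raise ValueError from max() on the empty list; Pre_ excludes exactly that.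
def Pre_digitize_stenosis (stenosis : List Int) : Prop := stenosis ≠ []
instance (stenosis : List Int) : Decidable (Pre_digitize_stenosis stenosis) := by unfold Pre_digitize_stenosis; infer_instance
def pvWitness_digitize_stenosis : List Int := [10, 42, 7]

def Spec_digitize_stenosis (stenosis : List Int) (out : Int) : Prop := out = digitize_stenosis_alt stenosis
instance (stenosis : List Int) (out : Int) : Decidable (Spec_digitize_stenosis stenosis out) := by unfold Spec_digitize_stenosis; infer_instance

-- ===== CLAIM (what is proved, stated in full; the proofs are below) =====
def Claim_equal_digitize_stenosis : Prop := ∀ (stenosis : List Int), Dom_digitize_stenosis stenosis → Pre_digitize_stenosis stenosis → Spec_digitize_stenosis stenosis (digitize_stenosis stenosis)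

-- ===== LEMMAS AND PROOFS =====
def pvCat (x : Int) : Int := if x < 20 then 0 else if x < 50 then 1 else 2

theorem pvCat_max (a b : Int) : pvCat (max a b) = max (pvCat a) (pvCat b) := by
  unfold pvCat; rcases le_total a b with h | h <;> simp [max_def] <;> split_ifs <;> omega

theorem pvA_fold_map (l : List Int) (acc : List Int) :
    l.foldl (fun result frame_stenosis =>
      if frame_stenosis < 20 then result ++ [(0 : Int)]
      else if 20 ≤ frame_stenosis ∧ frame_stenosis < 50 then result ++ [(1 : Int)]
      else if frame_stenosis ≥ 50 then result ++ [(2 : Int)]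
      else result) acc = acc ++ l.map pvCat := by
  induction l generalizing acc with
  | nil => simp
  | cons x t ih =>
    have hx : (if x < 20 then acc ++ [(0 : Int)]
        else if 20 ≤ x ∧ x < 50 then acc ++ [(1 : Int)]
        else if x ≥ 50 then acc ++ [(2 : Int)]
        else acc) = acc ++ [pvCat x] := by
      unfold pvCat; split_ifs <;> first | rfl | omega
    simp only [List.foldl_cons, hx, ih, List.map_cons]
    simp

theorem pvCat_foldl_max (t : List Int) (x : Int) :
    (t.map pvCat).foldl max (pvCat x) = pvCat (t.foldl max x) := by
  induction t generalizing x with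
  | nil => rfl
  | cons y s ih => simp only [List.map_cons, List.foldl_cons, ← pvCat_max, ih]

-- ===== VERDICT (by name: the statement is the Claim_ definition above) =====
theorem digitize_stenosis_spec : Claim_equal_digitize_stenosis := by
  intro stenosis _ hpre
  unfold Spec_digitize_stenosis digitize_stenosis digitize_stenosis_alt
  cases stenosis with
  | nil => exact absurd rfl hpre
  | cons x t =>
    simp only [pvA_fold_map, List.nil_append, PySem.List.max?_id_cons, List.map_cons,
      Option.getD_some, pvCat_foldl_max]
    rfl
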